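-- pv_equiv track=rewrite | github.com/EmittingLight/AirDrawing | main.py | get_stroke_cell
-- ===== SOURCE A (Python) =====
-- def get_stroke_bounds(points):
--     if not points:
--         return None
--
--     xs = [p[0] for p in points]
--     ys = [p[1] for p in points]
--
--     return min(xs), min(ys), max(xs), max(ys)
--
-- def get_stroke_cell(points, frame_w, frame_h):
--     bounds = get_stroke_bounds(points)
--     if bounds is None:
--         return None
--
--     min_x, min_y, max_x, max_y = bounds
--
--     cell_w = frame_w // 3
--     cell_h = frame_h // 3
--
--     best_row, best_col = None, None
--     best_overlap = 0
--
--     for row in range(3):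
--         for col in range(3):
--             cell_x1 = col * cell_w
--             cell_y1 = row * cell_h
--             cell_x2 = cell_x1 + cell_w
--             cell_y2 = cell_y1 + cell_h
--
--             overlap_x1 = max(min_x, cell_x1)
--             overlap_y1 = max(min_y, cell_y1)
--             overlap_x2 = min(max_x, cell_x2)
--             overlap_y2 = min(max_y, cell_y2)
--
--             overlap_w = max(0, overlap_x2 - overlap_x1)
--             overlap_h = max(0, overlap_y2 - overlap_y1)
--             overlap_area = overlap_w * overlap_h
--
--             if overlap_area > best_overlap:
--                 best_overlap = overlap_area
--                 best_row, best_col = row, col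
--
--     if best_row is None:
--         return None
--
--     return best_row, best_col
-- ===== SOURCE B (Python) =====
-- def get_stroke_cell(points, frame_w, frame_h):
--     if not points:
--         return None
--
--     min_x = min(p[0] for p in points)
--     max_x = max(p[0] for p in points)
--     min_y = min(p[1] for p in points)
--     max_y = max(p[1] for p in points)
--
--     cell_w = frame_w // 3
--     cell_h = frame_h // 3
--
--     best_col, best_w = 0, -1
--     for col in range(3):
--         w = max(0, min(max_x, col * cell_w + cell_w) - max(min_x, col * cell_w))
--         if w > best_w:
--             best_col, best_w = col, w
--
--     best_row, best_h = 0, -1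
--     for row in range(3):
--         h = max(0, min(max_y, row * cell_h + cell_h) - max(min_y, row * cell_h))
--         if h > best_h:
--             best_row, best_h = row, h
--
--     if best_w * best_h > 0:
--         return (best_row, best_col)
--     return None
-- ===== Notes on version B (the rewrite author's own statement) =====
-- stated objective: alternative
-- what changed: Replaces the 3x3 row-major nested scan maximizing overlap_w*overlap_h per cell with two independent per-axis scans (first column maximizing width overlap, first row maximizing height overlap) and a single positivity test of the product, using that the overlap area factorizes per axis and the first 2D maximizer is the pair of first 1D maximizers.
import Mathlib
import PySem

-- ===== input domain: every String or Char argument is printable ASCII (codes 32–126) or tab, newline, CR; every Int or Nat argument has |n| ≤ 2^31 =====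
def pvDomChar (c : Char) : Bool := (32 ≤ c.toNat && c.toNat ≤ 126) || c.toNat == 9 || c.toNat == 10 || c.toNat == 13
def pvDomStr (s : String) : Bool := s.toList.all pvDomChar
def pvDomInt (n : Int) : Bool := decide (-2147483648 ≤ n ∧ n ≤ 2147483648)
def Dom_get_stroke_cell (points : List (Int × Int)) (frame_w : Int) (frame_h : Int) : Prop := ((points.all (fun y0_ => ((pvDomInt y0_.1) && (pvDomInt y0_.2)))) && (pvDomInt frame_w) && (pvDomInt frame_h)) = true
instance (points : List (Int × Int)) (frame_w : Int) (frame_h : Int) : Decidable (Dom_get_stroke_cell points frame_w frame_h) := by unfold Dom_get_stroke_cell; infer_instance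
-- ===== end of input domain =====

-- B re-decomposes the 3x3 row-major argmax of overlap areas into two independent
-- per-axis first-argmax scans (columns by width overlap, rows by height overlap)
-- followed by a single positivity test of the product; same return value everywhere.

-- ===== PORT A =====
def get_stroke_bounds (points : List (Int × Int)) : Option (Int × Int × Int × Int) :=
  if points = [] then none
  else
    let xs := points.map Prod.fst
    let ys := points.map Prod.snd
    match PySem.List.min? xs (fun x => x), PySem.List.min? ys (fun x => x),
          PySem.List.max? xs (fun x => x), PySem.List.max? ys (fun x => x) with
    | some a, some b, some c, some d => some (a, b, c, d)
    | _, _, _, _ => none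

def get_stroke_cell (points : List (Int × Int)) (frame_w : Int) (frame_h : Int) : Option (Int × Int) :=
  match get_stroke_bounds points with
  | none => none
  | some (min_x, min_y, max_x, max_y) =>
    let cell_w := PySem.Int.floordiv frame_w 3
    let cell_h := PySem.Int.floordiv frame_h 3
    let r := (PySem.List.pyRange 0 3 1).foldl (fun st row =>
        (PySem.List.pyRange 0 3 1).foldl (fun st col =>
          let cell_x1 := col * cell_w
          let cell_y1 := row * cell_h
          let cell_x2 := cell_x1 + cell_w
          let cell_y2 := cell_y1 + cell_h
          let overlap_x1 := max min_x cell_x1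
          let overlap_y1 := max min_y cell_y1
          let overlap_x2 := min max_x cell_x2
          let overlap_y2 := min max_y cell_y2
          let overlap_w := max 0 (overlap_x2 - overlap_x1)
          let overlap_h := max 0 (overlap_y2 - overlap_y1)
          let overlap_area := overlap_w * overlap_h
          if overlap_area > st.2 then (some (row, col), overlap_area) else st) st)
        ((none : Option (Int × Int)), (0 : Int))
    match r.1 with
    | none => none
    | some rc => some rc

-- ===== PORT B =====
def get_stroke_cell_alt (points : List (Int × Int)) (frame_w : Int) (frame_h : Int) : Option (Int × Int) :=
  if points = [] then none
  else
    match PySem.List.min? (points.map Prod.fst) (fun x => x), PySem.List.max? (points.map Prod.fst) (fun x => x),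
          PySem.List.min? (points.map Prod.snd) (fun x => x), PySem.List.max? (points.map Prod.snd) (fun x => x) with
    | some min_x, some max_x, some min_y, some max_y =>
      let cell_w := PySem.Int.floordiv frame_w 3
      let cell_h := PySem.Int.floordiv frame_h 3
      let cb := (PySem.List.pyRange 0 3 1).foldl (fun st col =>
          let w := max 0 (min max_x (col * cell_w + cell_w) - max min_x (col * cell_w))
          if w > st.2 then (col, w) else st) ((0 : Int), (-1 : Int))
      let rb := (PySem.List.pyRange 0 3 1).foldl (fun st row =>
          let h := max 0 (min max_y (row * cell_h + cell_h) - max min_y (row * cell_h))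
          if h > st.2 then (row, h) else st) ((0 : Int), (-1 : Int))
      if cb.2 * rb.2 > 0 then some (rb.1, cb.1) else none
    | _, _, _, _ => none

-- ===== PRECONDITION & SPEC =====
def Spec_get_stroke_cell (points : List (Int × Int)) (frame_w : Int) (frame_h : Int) (out : Option (Int × Int)) : Prop := out = get_stroke_cell_alt points frame_w frame_h
instance (points : List (Int × Int)) (frame_w : Int) (frame_h : Int) (out : Option (Int × Int)) : Decidable (Spec_get_stroke_cell points frame_w frame_h out) := by unfold Spec_get_stroke_cell; infer_instance

-- ===== CLAIM (what is proved, stated in full; the proofs are below) =====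
def Claim_equal_get_stroke_cell : Prop := ∀ (points : List (Int × Int)) (frame_w : Int) (frame_h : Int), Dom_get_stroke_cell points frame_w frame_h → Spec_get_stroke_cell points frame_w frame_h (get_stroke_cell points frame_w frame_h)

-- ===== LEMMAS AND PROOFS =====

-- the nine grid cells in A's row-major visiting order
def pvL9 : List (Int × Int) := [(0,0),(0,1),(0,2),(1,0),(1,1),(1,2),(2,0),(2,1),(2,2)]

-- A's running strict-max loop = (first element attaining the running max, the max)
lemma run_fold (f : Int × Int → Int) (L : List (Int × Int)) (b : Option (Int × Int)) (m : Int) :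
    L.foldl (fun st p => if f p > st.2 then (some p, f p) else st) (b, m) =
    ((if L.foldl (fun acc p => max acc (f p)) m = m then b
      else L.find? (fun p => decide (f p = L.foldl (fun acc p => max acc (f p)) m))),
     L.foldl (fun acc p => max acc (f p)) m) := by
  induction L generalizing b m with
  | nil => simp
  | cons p tl ih =>
    simp only [List.foldl_cons]
    by_cases hc : f p > m
    · rw [if_pos hc, ih (some p) (f p)]
      simp only [show max m (f p) = f p by omega]
      have hge : f p ≤ tl.foldl (fun acc p => max acc (f p)) (f p) :=
        (PySem.List.le_foldl_max_int tl f (f p)).1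
      have hne : ¬ (tl.foldl (fun acc p => max acc (f p)) (f p) = m) := by omega
      rw [if_neg hne]
      refine congrArg (fun o => (o, _)) ?_
      by_cases he : tl.foldl (fun acc p => max acc (f p)) (f p) = f p
      · rw [if_pos he, List.find?_cons_of_pos (by simp only [decide_eq_true_eq]; omega)]
      · rw [if_neg he, List.find?_cons_of_neg (by simp only [decide_eq_true_eq]; omega)]
    · rw [if_neg hc, ih b m]
      simp only [show max m (f p) = m by omega]
      have hge : m ≤ tl.foldl (fun acc p => max acc (f p)) m :=
        (PySem.List.le_foldl_max_int tl f m).1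
      refine congrArg (fun o => (o, _)) ?_
      by_cases he : tl.foldl (fun acc p => max acc (f p)) m = m
      · rw [if_pos he, if_pos he]
      · rw [if_neg he, if_neg he, List.find?_cons_of_neg (by simp only [decide_eq_true_eq]; omega)]

-- B's per-axis loop: first strict maximizer over indices 0,1,2
lemma axis3 (v : Int → Int) (h0 : 0 ≤ v 0) (c W : Int)
    (hF : (([0,1,2] : List Int)).foldl (fun st i => if v i > st.2 then (i, v i) else st) ((0:Int), (-1:Int)) = (c, W)) :
    (c = 0 ∨ c = 1 ∨ c = 2) ∧ W = v c ∧ (v 0 ≤ W ∧ v 1 ≤ W ∧ v 2 ≤ W) ∧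
      (∀ i : Int, 0 ≤ i → i < c → v i < W) := by
  simp only [List.foldl_cons, List.foldl_nil] at hF
  rw [if_pos (show v 0 > -1 by omega)] at hF
  split_ifs at hF with h1 h2 h2 <;>
    (rw [Prod.mk.injEq] at hF
     obtain ⟨h3, h4⟩ := hF
     subst h3
     subst h4) <;>
    refine ⟨by omega, rfl, ⟨by omega, by omega, by omega⟩, ?_⟩ <;>
    intro i hi1 hi2 <;>
    (have hi : i = 0 ∨ i = 1 := by omega) <;>
    rcases hi with rfl | rfl <;> omega

lemma mul_lt_mul_bound (w W hv H : Int) (hw : w ≤ W) (hlt : hv < H) (hn : 0 ≤ hv) (hWp : 0 < W) :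
    w * hv < W * H := by nlinarith

lemma find9 (w h : Int → Int) (W H R C : Int)
    (hW : 0 < W) (hH : 0 < H)
    (hw0 : w 0 ≤ W) (hw1 : w 1 ≤ W) (hw2 : w 2 ≤ W)
    (hh0n : 0 ≤ h 0) (hh1n : 0 ≤ h 1)
    (hC : C = 0 ∨ C = 1 ∨ C = 2) (hR : R = 0 ∨ R = 1 ∨ R = 2)
    (hwC : w C = W) (hhR : h R = H)
    (hwlt : ∀ i : Int, 0 ≤ i → i < C → w i < W)
    (hhlt : ∀ i : Int, 0 ≤ i → i < R → h i < H) :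
    pvL9.find? (fun p => decide (w p.2 * h p.1 = W * H)) = some (R, C) := by
  simp only [pvL9]
  rcases hR with rfl | rfl | rfl <;> rcases hC with rfl | rfl | rfl
  · -- R=0, C=0
    rw [List.find?_cons_of_pos (by simp only [decide_eq_true_eq]; rw [hwC, hhR])]
  · -- R=0, C=1
    rw [List.find?_cons_of_neg (by simp only [decide_eq_true_eq]; rw [hhR]; exact ne_of_lt (mul_lt_mul_of_pos_right (hwlt 0 (by omega) (by omega)) hH))]
    rw [List.find?_cons_of_pos (by simp only [decide_eq_true_eq]; rw [hwC, hhR])]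
  · -- R=0, C=2
    rw [List.find?_cons_of_neg (by simp only [decide_eq_true_eq]; rw [hhR]; exact ne_of_lt (mul_lt_mul_of_pos_right (hwlt 0 (by omega) (by omega)) hH))]
    rw [List.find?_cons_of_neg (by simp only [decide_eq_true_eq]; rw [hhR]; exact ne_of_lt (mul_lt_mul_of_pos_right (hwlt 1 (by omega) (by omega)) hH))]
    rw [List.find?_cons_of_pos (by simp only [decide_eq_true_eq]; rw [hwC, hhR])]
  · -- R=1, C=0
    rw [List.find?_cons_of_neg (by simp only [decide_eq_true_eq]; exact ne_of_lt (mul_lt_mul_bound (w 0) W (h 0) H hw0 (hhlt 0 (by omega) (by omega)) hh0n hW))]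
    rw [List.find?_cons_of_neg (by simp only [decide_eq_true_eq]; exact ne_of_lt (mul_lt_mul_bound (w 1) W (h 0) H hw1 (hhlt 0 (by omega) (by omega)) hh0n hW))]
    rw [List.find?_cons_of_neg (by simp only [decide_eq_true_eq]; exact ne_of_lt (mul_lt_mul_bound (w 2) W (h 0) H hw2 (hhlt 0 (by omega) (by omega)) hh0n hW))]
    rw [List.find?_cons_of_pos (by simp only [decide_eq_true_eq]; rw [hwC, hhR])]
  · -- R=1, C=1
    rw [List.find?_cons_of_neg (by simp only [decide_eq_true_eq]; exact ne_of_lt (mul_lt_mul_bound (w 0) W (h 0) H hw0 (hhlt 0 (by omega) (by omega)) hh0n hW))]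
    rw [List.find?_cons_of_neg (by simp only [decide_eq_true_eq]; exact ne_of_lt (mul_lt_mul_bound (w 1) W (h 0) H hw1 (hhlt 0 (by omega) (by omega)) hh0n hW))]
    rw [List.find?_cons_of_neg (by simp only [decide_eq_true_eq]; exact ne_of_lt (mul_lt_mul_bound (w 2) W (h 0) H hw2 (hhlt 0 (by omega) (by omega)) hh0n hW))]
    rw [List.find?_cons_of_neg (by simp only [decide_eq_true_eq]; rw [hhR]; exact ne_of_lt (mul_lt_mul_of_pos_right (hwlt 0 (by omega) (by omega)) hH))]
    rw [List.find?_cons_of_pos (by simp only [decide_eq_true_eq]; rw [hwC, hhR])]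
  · -- R=1, C=2
    rw [List.find?_cons_of_neg (by simp only [decide_eq_true_eq]; exact ne_of_lt (mul_lt_mul_bound (w 0) W (h 0) H hw0 (hhlt 0 (by omega) (by omega)) hh0n hW))]
    rw [List.find?_cons_of_neg (by simp only [decide_eq_true_eq]; exact ne_of_lt (mul_lt_mul_bound (w 1) W (h 0) H hw1 (hhlt 0 (by omega) (by omega)) hh0n hW))]
    rw [List.find?_cons_of_neg (by simp only [decide_eq_true_eq]; exact ne_of_lt (mul_lt_mul_bound (w 2) W (h 0) H hw2 (hhlt 0 (by omega) (by omega)) hh0n hW))]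
    rw [List.find?_cons_of_neg (by simp only [decide_eq_true_eq]; rw [hhR]; exact ne_of_lt (mul_lt_mul_of_pos_right (hwlt 0 (by omega) (by omega)) hH))]
    rw [List.find?_cons_of_neg (by simp only [decide_eq_true_eq]; rw [hhR]; exact ne_of_lt (mul_lt_mul_of_pos_right (hwlt 1 (by omega) (by omega)) hH))]
    rw [List.find?_cons_of_pos (by simp only [decide_eq_true_eq]; rw [hwC, hhR])]
  · -- R=2, C=0
    rw [List.find?_cons_of_neg (by simp only [decide_eq_true_eq]; exact ne_of_lt (mul_lt_mul_bound (w 0) W (h 0) H hw0 (hhlt 0 (by omega) (by omega)) hh0n hW))]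
    rw [List.find?_cons_of_neg (by simp only [decide_eq_true_eq]; exact ne_of_lt (mul_lt_mul_bound (w 1) W (h 0) H hw1 (hhlt 0 (by omega) (by omega)) hh0n hW))]
    rw [List.find?_cons_of_neg (by simp only [decide_eq_true_eq]; exact ne_of_lt (mul_lt_mul_bound (w 2) W (h 0) H hw2 (hhlt 0 (by omega) (by omega)) hh0n hW))]
    rw [List.find?_cons_of_neg (by simp only [decide_eq_true_eq]; exact ne_of_lt (mul_lt_mul_bound (w 0) W (h 1) H hw0 (hhlt 1 (by omega) (by omega)) hh1n hW))]
    rw [List.find?_cons_of_neg (by simp only [decide_eq_true_eq]; exact ne_of_lt (mul_lt_mul_bound (w 1) W (h 1) H hw1 (hhlt 1 (by omega) (by omega)) hh1n hW))]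
    rw [List.find?_cons_of_neg (by simp only [decide_eq_true_eq]; exact ne_of_lt (mul_lt_mul_bound (w 2) W (h 1) H hw2 (hhlt 1 (by omega) (by omega)) hh1n hW))]
    rw [List.find?_cons_of_pos (by simp only [decide_eq_true_eq]; rw [hwC, hhR])]
  · -- R=2, C=1
    rw [List.find?_cons_of_neg (by simp only [decide_eq_true_eq]; exact ne_of_lt (mul_lt_mul_bound (w 0) W (h 0) H hw0 (hhlt 0 (by omega) (by omega)) hh0n hW))]
    rw [List.find?_cons_of_neg (by simp only [decide_eq_true_eq]; exact ne_of_lt (mul_lt_mul_bound (w 1) W (h 0) H hw1 (hhlt 0 (by omega) (by omega)) hh0n hW))]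
    rw [List.find?_cons_of_neg (by simp only [decide_eq_true_eq]; exact ne_of_lt (mul_lt_mul_bound (w 2) W (h 0) H hw2 (hhlt 0 (by omega) (by omega)) hh0n hW))]
    rw [List.find?_cons_of_neg (by simp only [decide_eq_true_eq]; exact ne_of_lt (mul_lt_mul_bound (w 0) W (h 1) H hw0 (hhlt 1 (by omega) (by omega)) hh1n hW))]
    rw [List.find?_cons_of_neg (by simp only [decide_eq_true_eq]; exact ne_of_lt (mul_lt_mul_bound (w 1) W (h 1) H hw1 (hhlt 1 (by omega) (by omega)) hh1n hW))]
    rw [List.find?_cons_of_neg (by simp only [decide_eq_true_eq]; exact ne_of_lt (mul_lt_mul_bound (w 2) W (h 1) H hw2 (hhlt 1 (by omega) (by omega)) hh1n hW))]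
    rw [List.find?_cons_of_neg (by simp only [decide_eq_true_eq]; rw [hhR]; exact ne_of_lt (mul_lt_mul_of_pos_right (hwlt 0 (by omega) (by omega)) hH))]
    rw [List.find?_cons_of_pos (by simp only [decide_eq_true_eq]; rw [hwC, hhR])]
  · -- R=2, C=2
    rw [List.find?_cons_of_neg (by simp only [decide_eq_true_eq]; exact ne_of_lt (mul_lt_mul_bound (w 0) W (h 0) H hw0 (hhlt 0 (by omega) (by omega)) hh0n hW))]
    rw [List.find?_cons_of_neg (by simp only [decide_eq_true_eq]; exact ne_of_lt (mul_lt_mul_bound (w 1) W (h 0) H hw1 (hhlt 0 (by omega) (by omega)) hh0n hW))]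
    rw [List.find?_cons_of_neg (by simp only [decide_eq_true_eq]; exact ne_of_lt (mul_lt_mul_bound (w 2) W (h 0) H hw2 (hhlt 0 (by omega) (by omega)) hh0n hW))]
    rw [List.find?_cons_of_neg (by simp only [decide_eq_true_eq]; exact ne_of_lt (mul_lt_mul_bound (w 0) W (h 1) H hw0 (hhlt 1 (by omega) (by omega)) hh1n hW))]
    rw [List.find?_cons_of_neg (by simp only [decide_eq_true_eq]; exact ne_of_lt (mul_lt_mul_bound (w 1) W (h 1) H hw1 (hhlt 1 (by omega) (by omega)) hh1n hW))]
    rw [List.find?_cons_of_neg (by simp only [decide_eq_true_eq]; exact ne_of_lt (mul_lt_mul_bound (w 2) W (h 1) H hw2 (hhlt 1 (by omega) (by omega)) hh1n hW))]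
    rw [List.find?_cons_of_neg (by simp only [decide_eq_true_eq]; rw [hhR]; exact ne_of_lt (mul_lt_mul_of_pos_right (hwlt 0 (by omega) (by omega)) hH))]
    rw [List.find?_cons_of_neg (by simp only [decide_eq_true_eq]; rw [hhR]; exact ne_of_lt (mul_lt_mul_of_pos_right (hwlt 1 (by omega) (by omega)) hH))]
    rw [List.find?_cons_of_pos (by simp only [decide_eq_true_eq]; rw [hwC, hhR])]


lemma core2 (w h : Int → Int) (hw : ∀ i, 0 ≤ w i) (hh : ∀ i, 0 ≤ h i) :
    (match ((PySem.List.pyRange 0 3 1).foldl (fun st row =>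
        (PySem.List.pyRange 0 3 1).foldl (fun st col =>
          if w col * h row > st.2 then (some (row, col), w col * h row) else st) st)
        ((none : Option (Int × Int)), (0 : Int))).1 with
     | none => none
     | some rc => some rc) =
    (if ((PySem.List.pyRange 0 3 1).foldl (fun st col =>
          if w col > st.2 then (col, w col) else st) ((0 : Int), (-1 : Int))).2 *
        ((PySem.List.pyRange 0 3 1).foldl (fun st row =>
          if h row > st.2 then (row, h row) else st) ((0 : Int), (-1 : Int))).2 > 0
     then some ((((PySem.List.pyRange 0 3 1).foldl (fun st row =>
          if h row > st.2 then (row, h row) else st) ((0 : Int), (-1 : Int))).1,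
        (((PySem.List.pyRange 0 3 1).foldl (fun st col =>
          if w col > st.2 then (col, w col) else st) ((0 : Int), (-1 : Int)))).1))
     else none) := by
  have hrange : PySem.List.pyRange 0 3 1 = [0,1,2] := by decide
  rw [hrange]
  have hflat : (([0,1,2] : List Int)).foldl (fun st row =>
      (([0,1,2] : List Int)).foldl (fun st col =>
        if w col * h row > st.2 then (some (row, col), w col * h row) else st) st)
      ((none : Option (Int × Int)), (0 : Int)) =
      pvL9.foldl (fun st p => if w p.2 * h p.1 > st.2 then (some p, w p.2 * h p.1) else st)
      ((none : Option (Int × Int)), (0 : Int)) := rfl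
  rw [hflat, run_fold (fun p => w p.2 * h p.1) pvL9 none 0]
  rcases hFW : (([0,1,2] : List Int)).foldl (fun st col => if w col > st.2 then (col, w col) else st) ((0 : Int), (-1 : Int)) with ⟨cC, cW⟩
  rcases hFH : (([0,1,2] : List Int)).foldl (fun st row => if h row > st.2 then (row, h row) else st) ((0 : Int), (-1 : Int)) with ⟨rR, rH⟩
  obtain ⟨hcmem, hcW, ⟨hcle0, hcle1, hcle2⟩, hclt⟩ := axis3 w (hw 0) cC cW hFW
  obtain ⟨hrmem, hrH, ⟨hrle0, hrle1, hrle2⟩, hrlt⟩ := axis3 h (hh 0) rR rH hFH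
  dsimp only
  set M := pvL9.foldl (fun acc p => max acc (w p.2 * h p.1)) 0 with hMdef
  have hWnn : 0 ≤ cW := by rw [hcW]; exact hw cC
  have hHnn : 0 ≤ rH := by rw [hrH]; exact hh rR
  have hMub : ∀ p ∈ pvL9, w p.2 * h p.1 ≤ M := (PySem.List.le_foldl_max_int pvL9 _ 0).2
  have hMexp : M = max (max (max (max (max (max (max (max (max 0
      (w 0 * h 0)) (w 1 * h 0)) (w 2 * h 0)) (w 0 * h 1)) (w 1 * h 1)) (w 2 * h 1))
      (w 0 * h 2)) (w 1 * h 2)) (w 2 * h 2) := by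
    rw [hMdef]; rfl
  have hMle : M ≤ cW * rH := by
    rw [hMexp]
    have h00 : w 0 * h 0 ≤ cW * rH := mul_le_mul hcle0 hrle0 (hh 0) hWnn
    have h10 : w 1 * h 0 ≤ cW * rH := mul_le_mul hcle1 hrle0 (hh 0) hWnn
    have h20 : w 2 * h 0 ≤ cW * rH := mul_le_mul hcle2 hrle0 (hh 0) hWnn
    have h01 : w 0 * h 1 ≤ cW * rH := mul_le_mul hcle0 hrle1 (hh 1) hWnn
    have h11 : w 1 * h 1 ≤ cW * rH := mul_le_mul hcle1 hrle1 (hh 1) hWnn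
    have h21 : w 2 * h 1 ≤ cW * rH := mul_le_mul hcle2 hrle1 (hh 1) hWnn
    have h02 : w 0 * h 2 ≤ cW * rH := mul_le_mul hcle0 hrle2 (hh 2) hWnn
    have h12 : w 1 * h 2 ≤ cW * rH := mul_le_mul hcle1 hrle2 (hh 2) hWnn
    have h22 : w 2 * h 2 ≤ cW * rH := mul_le_mul hcle2 hrle2 (hh 2) hWnn
    have hBnn : (0 : Int) ≤ cW * rH := mul_nonneg hWnn hHnn
    simp only [max_le_iff]
    exact ⟨⟨⟨⟨⟨⟨⟨⟨⟨hBnn, h00⟩, h10⟩, h20⟩, h01⟩, h11⟩, h21⟩, h02⟩, h12⟩, h22⟩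
  have hMge : cW * rH ≤ M := by
    rw [hcW, hrH]
    rcases hcmem with hc | hc | hc <;> rcases hrmem with hr | hr | hr <;> rw [hc, hr]
    · exact hMub (0, 0) (by simp [pvL9])
    · exact hMub (1, 0) (by simp [pvL9])
    · exact hMub (2, 0) (by simp [pvL9])
    · exact hMub (0, 1) (by simp [pvL9])
    · exact hMub (1, 1) (by simp [pvL9])
    · exact hMub (2, 1) (by simp [pvL9])
    · exact hMub (0, 2) (by simp [pvL9])
    · exact hMub (1, 2) (by simp [pvL9])
    · exact hMub (2, 2) (by simp [pvL9])
  have hMeq : M = cW * rH := le_antisymm hMle hMge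
  by_cases hpos : cW * rH > 0
  · have hWpos : 0 < cW := by nlinarith
    have hHpos : 0 < rH := by nlinarith
    rw [if_neg (show ¬ (M = 0) from ne_of_gt (hMeq ▸ hpos)), if_pos hpos, hMeq]
    rw [find9 w h cW rH rR cC hWpos hHpos hcle0 hcle1 hcle2 (hh 0) (hh 1)
      hcmem hrmem hcW.symm hrH.symm hclt hrlt]
  · have hB0 : cW * rH = 0 := le_antisymm (not_lt.mp hpos) (mul_nonneg hWnn hHnn)
    rw [if_pos (by rw [hMeq, hB0]), if_neg hpos]

-- ===== VERDICT (by name: the statement is the Claim_ definition above) =====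
theorem get_stroke_cell_spec : Claim_equal_get_stroke_cell := by
  intro points fw fh _
  show get_stroke_cell points fw fh = get_stroke_cell_alt points fw fh
  by_cases hp : points = []
  · subst hp; rfl
  · have hxs : points.map Prod.fst ≠ [] := by simp [hp]
    have hys : points.map Prod.snd ≠ [] := by simp [hp]
    obtain ⟨mnx, hmnx⟩ : ∃ v, PySem.List.min? (points.map Prod.fst) (fun x => x) = some v := by
      cases h : PySem.List.min? (points.map Prod.fst) (fun x => x) with
      | none => exact absurd ((PySem.List.min?_eq_none_iff _ _).mp h) hxs
      | some v => exact ⟨v, rfl⟩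
    obtain ⟨mxx, hmxx⟩ : ∃ v, PySem.List.max? (points.map Prod.fst) (fun x => x) = some v := by
      cases h : PySem.List.max? (points.map Prod.fst) (fun x => x) with
      | none => exact absurd ((PySem.List.max?_eq_none_iff _ _).mp h) hxs
      | some v => exact ⟨v, rfl⟩
    obtain ⟨mny, hmny⟩ : ∃ v, PySem.List.min? (points.map Prod.snd) (fun x => x) = some v := by
      cases h : PySem.List.min? (points.map Prod.snd) (fun x => x) with
      | none => exact absurd ((PySem.List.min?_eq_none_iff _ _).mp h) hys
      | some v => exact ⟨v, rfl⟩
    obtain ⟨mxy, hmxy⟩ : ∃ v, PySem.List.max? (points.map Prod.snd) (fun x => x) = some v := by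
      cases h : PySem.List.max? (points.map Prod.snd) (fun x => x) with
      | none => exact absurd ((PySem.List.max?_eq_none_iff _ _).mp h) hys
      | some v => exact ⟨v, rfl⟩
    simp only [get_stroke_cell, get_stroke_cell_alt, get_stroke_bounds, if_neg hp,
      hmnx, hmxx, hmny, hmxy]
    exact core2 (fun col => max 0 (min mxx (col * PySem.Int.floordiv fw 3 + PySem.Int.floordiv fw 3) - max mnx (col * PySem.Int.floordiv fw 3)))
      (fun row => max 0 (min mxy (row * PySem.Int.floordiv fh 3 + PySem.Int.floordiv fh 3) - max mny (row * PySem.Int.floordiv fh 3)))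
      (fun i => le_max_left _ _) (fun i => le_max_left _ _)
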